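-- pv_equiv track=rewrite | github.com/Silemo/sage | docs/ai-guidelines/skills/dataverse-metadata-export/scripts/export_dataverse_metadata.py | render_relationship_section
-- ===== SOURCE A (Python) =====
-- from typing import Any
--
-- def markdown_escape(value: Any) -> str:
--     if value is None:
--         return ""
--     return str(value).replace("|", "\\|").replace("\n", " ")
--
-- def render_relationship_section(title: str, relationships: list[dict[str, Any]]) -> list[str]:
--     lines = [f"## {title}", ""]
--     if not relationships:
--         lines.append("_None_")
--         lines.append("")
--         return lines
--
--     if title == "Many-to-Many Relationships":
--         lines.append(
--             "| Schema | Intersect | Entity 1 | Attribute 1 | Nav 1 | Entity 2 | Attribute 2 | Nav 2 |"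
--         )
--         lines.append(
--             "|--------|-----------|----------|-------------|-------|----------|-------------|-------|"
--         )
--         for item in relationships:
--             lines.append(
--                 "| {schema} | {intersect} | {e1} | {a1} | {n1} | {e2} | {a2} | {n2} |".format(
--                     schema=markdown_escape(item.get("schema_name")),
--                     intersect=markdown_escape(item.get("intersect_entity_name")),
--                     e1=markdown_escape(item.get("entity1_logical_name")),
--                     a1=markdown_escape(item.get("entity1_intersect_attribute")),
--                     n1=markdown_escape(item.get("entity1_navigation_property_name")),
--                     e2=markdown_escape(item.get("entity2_logical_name")),
--                     a2=markdown_escape(item.get("entity2_intersect_attribute")),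
--                     n2=markdown_escape(item.get("entity2_navigation_property_name")),
--                 )
--             )
--     else:
--         lines.append(
--             "| Schema | Referenced Entity | Referenced Attribute | Referencing Entity | Referencing Attribute | Referenced Nav | Referencing Nav |"
--         )
--         lines.append(
--             "|--------|-------------------|----------------------|--------------------|-----------------------|----------------|-----------------|"
--         )
--         for item in relationships:
--             lines.append(
--                 "| {schema} | {re} | {ra} | {ing_e} | {ing_a} | {re_nav} | {ing_nav} |".format(
--                     schema=markdown_escape(item.get("schema_name")),
--                     re=markdown_escape(item.get("referenced_entity")),
--                     ra=markdown_escape(item.get("referenced_attribute")),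
--                     ing_e=markdown_escape(item.get("referencing_entity")),
--                     ing_a=markdown_escape(item.get("referencing_attribute")),
--                     re_nav=markdown_escape(item.get("referenced_entity_navigation_property_name")),
--                     ing_nav=markdown_escape(item.get("referencing_entity_navigation_property_name")),
--                 )
--             )
--     lines.append("")
--     return lines
-- ===== SOURCE B (Python) =====
-- def markdown_escape(value):
--     if value is None:
--         return ""
--     return str(value).replace("|", "\\|").replace("\n", " ")
--
-- _M2M_SPEC = [
--     ("Schema", "schema_name"),
--     ("Intersect", "intersect_entity_name"),
--     ("Entity 1", "entity1_logical_name"),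
--     ("Attribute 1", "entity1_intersect_attribute"),
--     ("Nav 1", "entity1_navigation_property_name"),
--     ("Entity 2", "entity2_logical_name"),
--     ("Attribute 2", "entity2_intersect_attribute"),
--     ("Nav 2", "entity2_navigation_property_name"),
-- ]
--
-- _ONE2MANY_SPEC = [
--     ("Schema", "schema_name"),
--     ("Referenced Entity", "referenced_entity"),
--     ("Referenced Attribute", "referenced_attribute"),
--     ("Referencing Entity", "referencing_entity"),
--     ("Referencing Attribute", "referencing_attribute"),
--     ("Referenced Nav", "referenced_entity_navigation_property_name"),
--     ("Referencing Nav", "referencing_entity_navigation_property_name"),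
-- ]
--
-- def render_relationship_section(title, relationships):
--     head = ["## " + title, ""]
--     if not relationships:
--         return head + ["_None_", ""]
--     spec = _M2M_SPEC if title == "Many-to-Many Relationships" else _ONE2MANY_SPEC
--     # Column-major: build one full column per (label, key) -- its heading cell,
--     # its separator dashes, then that column's cell for every relationship --
--     # then transpose with zip(*cols) and render each resulting row.
--     cols = [
--         [label, "-" * (len(label) + 2)] + [markdown_escape(item.get(key)) for item in relationships]
--         for label, key in spec
--     ]
--     header, sep, *data = zip(*cols)
--     return (head
--             + ["| " + " | ".join(header) + " |", "|" + "|".join(sep) + "|"]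
--             + ["| " + " | ".join(row) + " |" for row in data]
--             + [""])
-- ===== Notes on version B (the rewrite author's own statement) =====
-- stated objective: alternative
-- what changed: A builds the table row-major in one pass with hardcoded per-row format strings; B builds it column-major (one full column per (label,key) spec entry: heading, dash cell, then every relationship's escaped cell), transposes the columns with zip(*cols), and renders the resulting rows.
import Mathlib
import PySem

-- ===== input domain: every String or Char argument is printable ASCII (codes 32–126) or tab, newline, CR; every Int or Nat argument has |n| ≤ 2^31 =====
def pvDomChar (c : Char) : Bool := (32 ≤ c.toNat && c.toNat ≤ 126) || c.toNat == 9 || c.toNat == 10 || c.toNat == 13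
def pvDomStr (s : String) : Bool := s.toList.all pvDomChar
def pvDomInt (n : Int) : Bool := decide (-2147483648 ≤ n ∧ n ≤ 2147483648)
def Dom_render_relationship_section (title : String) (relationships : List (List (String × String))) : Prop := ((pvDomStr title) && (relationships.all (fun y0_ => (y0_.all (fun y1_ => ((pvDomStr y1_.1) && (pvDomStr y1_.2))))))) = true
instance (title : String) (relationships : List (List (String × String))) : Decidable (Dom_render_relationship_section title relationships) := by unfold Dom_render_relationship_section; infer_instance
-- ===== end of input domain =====

-- B builds the table COLUMN-MAJOR (one full column per spec entry: heading, dash cell, then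
-- each relationship's escaped cell), transposes with zip(*cols) and renders the rows, instead
-- of A's row-major pass with hardcoded format strings; objective: alternative. Return value only.

-- markdown_escape: shared helper, defined identically in both Pythons
def mdEscape (v : Option String) : String :=
  match v with
  | none => ""
  | some s => PySem.Str.replace (PySem.Str.replace s "|" "\\|") "\n" " "

-- ===== PORT A =====
def render_relationship_section (title : String) (relationships : List (List (String × String))) : List String :=
  let lines : List String := ["## " ++ title, ""]
  if relationships = [] then
    (lines ++ ["_None_"]) ++ [""]
  else if title = "Many-to-Many Relationships" then
    let lines := lines ++ ["| Schema | Intersect | Entity 1 | Attribute 1 | Nav 1 | Entity 2 | Attribute 2 | Nav 2 |"]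
    let lines := lines ++ ["|--------|-----------|----------|-------------|-------|----------|-------------|-------|"]
    let lines := relationships.foldl (fun acc item =>
      acc ++ ["| " ++ mdEscape (item.lookup "schema_name")
          ++ " | " ++ mdEscape (item.lookup "intersect_entity_name")
          ++ " | " ++ mdEscape (item.lookup "entity1_logical_name")
          ++ " | " ++ mdEscape (item.lookup "entity1_intersect_attribute")
          ++ " | " ++ mdEscape (item.lookup "entity1_navigation_property_name")
          ++ " | " ++ mdEscape (item.lookup "entity2_logical_name")
          ++ " | " ++ mdEscape (item.lookup "entity2_intersect_attribute")
          ++ " | " ++ mdEscape (item.lookup "entity2_navigation_property_name")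
          ++ " |"]) lines
    lines ++ [""]
  else
    let lines := lines ++ ["| Schema | Referenced Entity | Referenced Attribute | Referencing Entity | Referencing Attribute | Referenced Nav | Referencing Nav |"]
    let lines := lines ++ ["|--------|-------------------|----------------------|--------------------|-----------------------|----------------|-----------------|"]
    let lines := relationships.foldl (fun acc item =>
      acc ++ ["| " ++ mdEscape (item.lookup "schema_name")
          ++ " | " ++ mdEscape (item.lookup "referenced_entity")
          ++ " | " ++ mdEscape (item.lookup "referenced_attribute")
          ++ " | " ++ mdEscape (item.lookup "referencing_entity")
          ++ " | " ++ mdEscape (item.lookup "referencing_attribute")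
          ++ " | " ++ mdEscape (item.lookup "referenced_entity_navigation_property_name")
          ++ " | " ++ mdEscape (item.lookup "referencing_entity_navigation_property_name")
          ++ " |"]) lines
    lines ++ [""]

-- ===== PORT B =====
def specM2M : List (String × String) :=
  [("Schema", "schema_name"),
   ("Intersect", "intersect_entity_name"),
   ("Entity 1", "entity1_logical_name"),
   ("Attribute 1", "entity1_intersect_attribute"),
   ("Nav 1", "entity1_navigation_property_name"),
   ("Entity 2", "entity2_logical_name"),
   ("Attribute 2", "entity2_intersect_attribute"),
   ("Nav 2", "entity2_navigation_property_name")]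

def specOne : List (String × String) :=
  [("Schema", "schema_name"),
   ("Referenced Entity", "referenced_entity"),
   ("Referenced Attribute", "referenced_attribute"),
   ("Referencing Entity", "referencing_entity"),
   ("Referencing Attribute", "referencing_attribute"),
   ("Referenced Nav", "referenced_entity_navigation_property_name"),
   ("Referencing Nav", "referencing_entity_navigation_property_name")]

-- zip(*cols): row k is the k-th cell of every column. Exact for Python's zip when all
-- columns have length n, which holds for every cols Source B builds (length = len(rels)+2).
def zipCols (n : Nat) (cols : List (List String)) : List (List String) :=
  match n with
  | 0 => []
  | Nat.succ m => cols.map (fun c => c.headD "") :: zipCols m (cols.map List.tail)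

def render_relationship_section_alt (title : String) (relationships : List (List (String × String))) : List String :=
  let head : List String := ["## " ++ title, ""]
  if relationships = [] then
    head ++ ["_None_", ""]
  else
    let spec := if title = "Many-to-Many Relationships" then specM2M else specOne
    -- one column per spec entry: label, "-" * (len(label) + 2), then the cells
    let cols := spec.map (fun p =>
      p.1 :: String.ofList (List.replicate (PySem.Str.len p.1 + 2).toNat '-')
          :: relationships.map (fun item => mdEscape (item.lookup p.2)))
    -- header, sep, *data = zip(*cols); the star-unpack always succeeds (≥ 2 rows)
    match zipCols (relationships.length + 2) cols with
    | header :: sep :: data =>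
        head ++ ["| " ++ PySem.Str.join " | " header ++ " |",
                 "|" ++ PySem.Str.join "|" sep ++ "|"]
             ++ data.map (fun row => "| " ++ PySem.Str.join " | " row ++ " |")
             ++ [""]
    | _ => head  -- unreachable

-- ===== PRECONDITION & SPEC =====
def Spec_render_relationship_section (title : String) (relationships : List (List (String × String))) (out : List String) : Prop := out = render_relationship_section_alt title relationships
instance (title : String) (relationships : List (List (String × String))) (out : List String) : Decidable (Spec_render_relationship_section title relationships out) := by unfold Spec_render_relationship_section; infer_instance

-- ===== CLAIM (what is proved, stated in full; the proofs are below) =====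
def Claim_equal_render_relationship_section : Prop := ∀ (title : String) (relationships : List (List (String × String))), Dom_render_relationship_section title relationships → Spec_render_relationship_section title relationships (render_relationship_section title relationships)

-- ===== LEMMAS AND PROOFS =====

theorem zipCols_transpose {β : Type} (rels : List (List (String × String))) (l : List β)
    (f : β → List (String × String) → String) :
    zipCols rels.length (l.map (fun p => rels.map (f p)))
      = rels.map (fun r => l.map (fun p => f p r)) := by
  induction rels generalizing l with
  | nil => simp [zipCols]
  | cons r rs ih =>
      simp only [List.length_cons, zipCols, List.map_map, Function.comp_def]
      exact congrArg _ (ih l)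

theorem zipCols_cols {β : Type} (rels : List (List (String × String))) (l : List β)
    (c0 c1 : β → String) (f : β → List (String × String) → String) :
    zipCols (rels.length + 2) (l.map (fun p => c0 p :: c1 p :: rels.map (f p)))
      = l.map c0 :: l.map c1 :: rels.map (fun r => l.map (fun p => f p r)) := by
  simp only [zipCols, List.map_map, Function.comp_def]
  exact congrArg _ (congrArg _ (zipCols_transpose rels l f))

-- ===== VERDICT (by name: the statement is the Claim_ definition above) =====
set_option maxRecDepth 8192 in
set_option maxHeartbeats 1000000 in
theorem render_relationship_section_spec : Claim_equal_render_relationship_section := by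
  intro title relationships _
  unfold Spec_render_relationship_section
  unfold render_relationship_section render_relationship_section_alt
  by_cases hnil : relationships = []
  · simp [hnil]
  · by_cases ht : title = "Many-to-Many Relationships"
    · have hcols := zipCols_cols relationships specM2M (fun p => p.1)
        (fun p => String.ofList (List.replicate (PySem.Str.len p.1 + 2).toNat '-'))
        (fun p item => mdEscape (item.lookup p.2))
      have hh : "| " ++ PySem.Str.join " | " (specM2M.map (fun p => p.1)) ++ " |"
          = "| Schema | Intersect | Entity 1 | Attribute 1 | Nav 1 | Entity 2 | Attribute 2 | Nav 2 |" := by decide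
      have hs : "|" ++ PySem.Str.join "|" (specM2M.map (fun p => String.ofList (List.replicate (PySem.Str.len p.1 + 2).toNat '-'))) ++ "|"
          = "|--------|-----------|----------|-------------|-------|----------|-------------|-------|" := by decide
      have hrow : ∀ x : List (String × String),
          "| " ++ PySem.Str.join " | " (specM2M.map (fun p => mdEscape (x.lookup p.2))) ++ " |"
          = "| " ++ mdEscape (x.lookup "schema_name")
              ++ " | " ++ mdEscape (x.lookup "intersect_entity_name")
              ++ " | " ++ mdEscape (x.lookup "entity1_logical_name")
              ++ " | " ++ mdEscape (x.lookup "entity1_intersect_attribute")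
              ++ " | " ++ mdEscape (x.lookup "entity1_navigation_property_name")
              ++ " | " ++ mdEscape (x.lookup "entity2_logical_name")
              ++ " | " ++ mdEscape (x.lookup "entity2_intersect_attribute")
              ++ " | " ++ mdEscape (x.lookup "entity2_navigation_property_name")
              ++ " |" := by
        intro x
        rw [← String.toList_inj]
        simp [specM2M, PySem.Str.join, PySem.Chars.join_cons_cons, PySem.Chars.join_singleton]
      simp only [hnil, ht, if_false, if_true,
        PySem.List.foldl_append_singleton_eq_map, hcols, hh, hs]
      simp [hrow, List.map_map]
    · have hcols := zipCols_cols relationships specOne (fun p => p.1)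
        (fun p => String.ofList (List.replicate (PySem.Str.len p.1 + 2).toNat '-'))
        (fun p item => mdEscape (item.lookup p.2))
      have hh : "| " ++ PySem.Str.join " | " (specOne.map (fun p => p.1)) ++ " |"
          = "| Schema | Referenced Entity | Referenced Attribute | Referencing Entity | Referencing Attribute | Referenced Nav | Referencing Nav |" := by decide
      have hs : "|" ++ PySem.Str.join "|" (specOne.map (fun p => String.ofList (List.replicate (PySem.Str.len p.1 + 2).toNat '-'))) ++ "|"
          = "|--------|-------------------|----------------------|--------------------|-----------------------|----------------|-----------------|" := by decide
      have hrow : ∀ x : List (String × String),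
          "| " ++ PySem.Str.join " | " (specOne.map (fun p => mdEscape (x.lookup p.2))) ++ " |"
          = "| " ++ mdEscape (x.lookup "schema_name")
              ++ " | " ++ mdEscape (x.lookup "referenced_entity")
              ++ " | " ++ mdEscape (x.lookup "referenced_attribute")
              ++ " | " ++ mdEscape (x.lookup "referencing_entity")
              ++ " | " ++ mdEscape (x.lookup "referencing_attribute")
              ++ " | " ++ mdEscape (x.lookup "referenced_entity_navigation_property_name")
              ++ " | " ++ mdEscape (x.lookup "referencing_entity_navigation_property_name")
              ++ " |" := by
        intro x
        rw [← String.toList_inj]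
        simp [specOne, PySem.Str.join, PySem.Chars.join_cons_cons, PySem.Chars.join_singleton]
      simp only [hnil, ht, if_false,
        PySem.List.foldl_append_singleton_eq_map, hcols, hh, hs]
      simp [hrow, List.map_map]
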